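-- pv_equiv track=rewrite | github.com/maxastyler/Sodium-DFT-Project | scripts/chunk_phonons.py | group_into_ascending
-- ===== SOURCE A (Python) =====
-- def group_into_ascending(l):
--     l.sort()
--     if len(l)==0:
--         return []
--     if len(l)==1:
--         return [[l[0]]]
--     grouped=[[]]
--     for i in range(len(l)):
--         if i==0:
--             grouped[-1].append(l[i])
--         else:
--             if l[i]-l[i-1]!=1:
--                 grouped.append([])
--             grouped[-1].append(l[i])
--     return grouped
-- ===== SOURCE B (Python) =====
-- from itertools import groupby
--
-- def group_into_ascending(l):
--     l.sort()
--     return [[v for _, v in g]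
--             for _, g in groupby(enumerate(l), key=lambda iv: iv[1] - iv[0])]
-- ===== Notes on version B (the rewrite author's own statement) =====
-- stated objective: idiomatic
-- what changed: Replaces the index-based loop with explicit len==0/len==1 special cases and manual last-group mutation by a single itertools.groupby over enumerate(l) keyed on value-index (constant on a consecutive run), with no special cases.
import Mathlib
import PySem

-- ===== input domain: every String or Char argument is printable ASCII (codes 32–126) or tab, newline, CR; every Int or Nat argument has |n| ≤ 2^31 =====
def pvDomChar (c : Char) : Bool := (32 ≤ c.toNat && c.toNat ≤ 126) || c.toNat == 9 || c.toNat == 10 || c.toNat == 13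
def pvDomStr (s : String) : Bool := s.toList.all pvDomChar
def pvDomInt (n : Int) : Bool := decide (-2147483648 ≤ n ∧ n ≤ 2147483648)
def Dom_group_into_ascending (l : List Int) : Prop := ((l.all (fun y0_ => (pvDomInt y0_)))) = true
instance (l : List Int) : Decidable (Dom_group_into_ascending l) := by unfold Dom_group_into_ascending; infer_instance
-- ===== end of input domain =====

-- B replaces A's index loop with len==0/len==1 special cases by one itertools.groupby over
-- enumerate keyed on value-index (idiomatic). Both Pythons sort l in place; the claim is
-- about the return value only.

-- ===== PORT A =====
-- grouped[-1].append(x)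
def pvAppendLast (g : List (List Int)) (x : Int) : List (List Int) :=
  g.dropLast ++ [g.getLastD [] ++ [x]]

def group_into_ascending (l : List Int) : List (List Int) :=
  let s := PySem.List.sorted l (fun x => x) false
  if s.length = 0 then []
  else if s.length = 1 then [[PySem.List.pyGetD s 0 0]]
  else
    (PySem.List.pyRange 0 s.length 1).foldl
      (fun grouped i =>
        if i = 0 then pvAppendLast grouped (PySem.List.pyGetD s i 0)
        else if PySem.List.pyGetD s i 0 - PySem.List.pyGetD s (i - 1) 0 ≠ 1 then
          pvAppendLast (grouped ++ [[]]) (PySem.List.pyGetD s i 0)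
        else pvAppendLast grouped (PySem.List.pyGetD s i 0))
      [[]]

-- ===== PORT B =====
-- groupby: collect maximal blocks of consecutive equal keys (acc = current group reversed,
-- k = its key)
def pvKeyRuns (k : Int) (acc : List Int) : List (Int × Int) → List (List Int)
  | [] => [acc.reverse]
  | (k', v) :: rest =>
    if k' = k then pvKeyRuns k (v :: acc) rest
    else acc.reverse :: pvKeyRuns k' [v] rest

def group_into_ascending_alt (l : List Int) : List (List Int) :=
  match (PySem.List.enumerate (PySem.List.sorted l (fun x => x) false) 0).map
      (fun p => (p.2 - p.1, p.2)) with
  | [] => []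
  | (k, v) :: rest => pvKeyRuns k [v] rest

-- ===== PRECONDITION & SPEC =====
def Spec_group_into_ascending (l : List Int) (out : List (List Int)) : Prop := out = group_into_ascending_alt l
instance (l : List Int) (out : List (List Int)) : Decidable (Spec_group_into_ascending l out) := by unfold Spec_group_into_ascending; infer_instance

-- ===== CLAIM (what is proved, stated in full; the proofs are below) =====
def Claim_equal_group_into_ascending : Prop := ∀ (l : List Int), Dom_group_into_ascending l → Spec_group_into_ascending l (group_into_ascending l)

-- ===== LEMMAS AND PROOFS =====

-- reference recursion both programs are reduced to: prev = last element placed,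
-- acc = current run reversed
def pvChop (prev : Int) (acc : List Int) : List Int → List (List Int)
  | [] => [acc.reverse]
  | y :: ys =>
    if y - prev = 1 then pvChop y (y :: acc) ys
    else acc.reverse :: pvChop y [y] ys

lemma pvAppendLast_concat (G : List (List Int)) (z : List Int) (x : Int) :
    pvAppendLast (G ++ [z]) x = G ++ [z ++ [x]] := by
  simp [pvAppendLast]

lemma pvKeyRuns_eq_chop (xs : List Int) : ∀ (i prev : Int) (acc : List Int),
    pvKeyRuns (prev - i) acc ((PySem.List.enumerate xs (i + 1)).map (fun p => (p.2 - p.1, p.2)))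
      = pvChop prev acc xs := by
  induction xs with
  | nil => intro i prev acc; simp [PySem.List.enumerate_nil, pvKeyRuns, pvChop]
  | cons y ys ih =>
    intro i prev acc
    rw [PySem.List.enumerate_cons]
    simp only [List.map_cons, pvKeyRuns, pvChop]
    by_cases h : y - prev = 1
    · rw [if_pos (by omega), if_pos h, show prev - i = y - (i + 1) by omega]
      exact ih (i + 1) y (y :: acc)
    · rw [if_neg (by omega), if_neg h]
      exact congrArg _ (ih (i + 1) y [y])

lemma pvFoldA (s : List Int) : ∀ (t : List Int) (j : Int) (G : List (List Int)) (r : List Int) (prev : Int),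
    1 ≤ j → j.toNat ≤ s.length → t = s.drop j.toNat → prev = s.getD (j.toNat - 1) 0 →
    (PySem.List.pyRange j s.length 1).foldl
      (fun grouped i =>
        if i = 0 then pvAppendLast grouped (PySem.List.pyGetD s i 0)
        else if PySem.List.pyGetD s i 0 - PySem.List.pyGetD s (i - 1) 0 ≠ 1 then
          pvAppendLast (grouped ++ [[]]) (PySem.List.pyGetD s i 0)
        else pvAppendLast grouped (PySem.List.pyGetD s i 0))
      (G ++ [r.reverse])
      = G ++ pvChop prev r t := by
  intro t
  induction t with
  | nil =>
    intro j G r prev h1 h2 ht hp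
    have hlen : (s.length : Int) ≤ j := by
      have := List.drop_eq_nil_iff.mp ht.symm
      omega
    rw [PySem.List.pyRange_one_eq_nil hlen]
    simp [pvChop]
  | cons y ys ih =>
    intro j G r prev h1 h2 ht hp
    have hjlt : j.toNat < s.length := by
      rcases Nat.lt_or_ge j.toNat s.length with h | h
      · exact h
      · rw [List.drop_eq_nil_iff.mpr h] at ht
        simp at ht
    have hjlt' : j < (s.length : Int) := by omega
    have hy : s.getD j.toNat 0 = y := by
      have h0 : (s.drop j.toNat)[0]? = some y := by rw [← ht]; rfl
      rw [List.getElem?_drop] at h0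
      simp only [Nat.add_zero] at h0
      rw [List.getD_eq_getElem?_getD, h0]
      rfl
    rw [PySem.List.pyRange_one_cons hjlt']
    simp only [List.foldl_cons]
    have hget : PySem.List.pyGetD s j 0 = y := by
      rw [PySem.List.pyGetD_of_nonneg s 0 (by omega), hy]
    have hgetp : PySem.List.pyGetD s (j - 1) 0 = prev := by
      rw [PySem.List.pyGetD_of_nonneg s 0 (by omega), hp]
      congr 1
      omega
    rw [if_neg (by omega), hget, hgetp]
    by_cases h : y - prev = 1
    · rw [if_neg (by omega)]
      rw [pvAppendLast_concat G r.reverse y, show r.reverse ++ [y] = (y :: r).reverse by simp]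
      rw [ih (j + 1) G (y :: r) y (by omega) (by omega)
        (by rw [show (j + 1).toNat = j.toNat + 1 by omega, ← List.drop_drop]; rw [← ht]; rfl)
        (by rw [show (j + 1).toNat - 1 = j.toNat by omega, hy])]
      simp [pvChop, h]
    · rw [if_pos (by omega)]
      rw [show G ++ [r.reverse] ++ [[]] = (G ++ [r.reverse]) ++ [[]] by simp,
          pvAppendLast_concat (G ++ [r.reverse]) [] y]
      simp only [List.nil_append]
      rw [show (G ++ [r.reverse]) ++ [[y]] = (G ++ [r.reverse]) ++ [[y].reverse] by simp]
      rw [ih (j + 1) (G ++ [r.reverse]) [y] y (by omega) (by omega)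
        (by rw [show (j + 1).toNat = j.toNat + 1 by omega, ← List.drop_drop]; rw [← ht]; rfl)
        (by rw [show (j + 1).toNat - 1 = j.toNat by omega, hy])]
      simp [pvChop, h]

lemma pvAlt_eq_chop (x : Int) (xs : List Int) (l : List Int)
    (hs : PySem.List.sorted l (fun y => y) false = x :: xs) :
    group_into_ascending_alt l = pvChop x [x] xs := by
  unfold group_into_ascending_alt
  rw [hs, PySem.List.enumerate_cons, List.map_cons]
  simpa using pvKeyRuns_eq_chop xs 0 x [x]

-- ===== VERDICT (by name: the statement is the Claim_ definition above) =====
theorem group_into_ascending_spec : Claim_equal_group_into_ascending := by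
  intro l _
  unfold Spec_group_into_ascending
  unfold group_into_ascending
  cases hs : PySem.List.sorted l (fun y => y) false with
  | nil =>
    unfold group_into_ascending_alt
    rw [hs]
    simp [PySem.List.enumerate_nil]
  | cons x xs =>
    cases xs with
    | nil =>
      rw [pvAlt_eq_chop x [] l hs]
      simp [pvChop, PySem.List.pyGetD_zero_cons]
    | cons x2 rest =>
      rw [if_neg (by simp), if_neg (by simp)]
      rw [pvAlt_eq_chop x (x2 :: rest) l hs]
      have hlen : (0 : Int) < ((x :: x2 :: rest).length : Int) := by
        simp only [List.length_cons]
        push_cast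
        omega
      rw [PySem.List.pyRange_one_cons hlen]
      simp only [List.foldl_cons, reduceIte, zero_add]
      have h0 : pvAppendLast [[]] (PySem.List.pyGetD (x :: x2 :: rest) 0 0) = [] ++ [[x].reverse] := by
        simp [pvAppendLast, PySem.List.pyGetD_zero_cons]
      rw [h0, pvFoldA (x :: x2 :: rest) (x2 :: rest) 1 [] [x] x (by omega)
        (by simp) (by rfl) (by rfl)]
      simp
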